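-- pv_equiv track=rewrite | github.com/chj3748/TIL | python/문제풀이/pg_jumpRidge.py | solution
-- ===== SOURCE A (Python) =====
-- def check(mid, stones, k):
--     cnt = 0
--     res = -25557000000
--     for v in stones:
--         if v < mid:
--             cnt += 1
--         else:
--             if cnt >= res:
--                 res = cnt
--             cnt = 0
--     else:
--         if cnt >= res:
--             res = cnt
--     return res >= k
--
-- def solution(stones, k):
--     s = 1
--     e = max(stones)
--     res = 0
--     while s <= e:
--         mid = (s + e) //2
--         if check(mid, stones, k):
--             e = mid - 1
--         else:
--             res = mid
--             s = mid + 1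
--
--     return res
-- ===== SOURCE B (Python) =====
-- def solution(stones, k):
--     n = len(stones)
--     if k <= 0:
--         return 0
--     if n < k:
--         return max(0, max(stones))
--     # O(n) sliding-window maximum by the two-pass block trick:
--     # pre[j] = max of stones from the start of j's k-block up to j,
--     # suf[j] = max of stones from j up to the end of j's k-block (clipped at n);
--     # the max of window [i, i+k) is then max(suf[i], pre[i+k-1]).
--     pre = stones.copy()
--     for j in range(1, n):
--         if j % k and pre[j - 1] > pre[j]:
--             pre[j] = pre[j - 1]
--     suf = stones.copy()
--     for j in range(n - 2, -1, -1):
--         if (j + 1) % k and suf[j + 1] > suf[j]: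
--             suf[j] = suf[j + 1]
--     w = min(max(suf[i], pre[i + k - 1]) for i in range(n - k + 1))
--     return max(0, w)
-- ===== Notes on version B (the rewrite author's own statement) =====
-- stated objective: faster
-- what changed: A binary-searches the answer value, running an O(n) longest-run-below-mid scan per probe; B computes each length-k sliding-window maximum in O(1) via a two-pass block prefix/suffix-max scan and returns the clamped minimum over all windows, with direct answers for k <= 0 and k > n.
import Mathlib
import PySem

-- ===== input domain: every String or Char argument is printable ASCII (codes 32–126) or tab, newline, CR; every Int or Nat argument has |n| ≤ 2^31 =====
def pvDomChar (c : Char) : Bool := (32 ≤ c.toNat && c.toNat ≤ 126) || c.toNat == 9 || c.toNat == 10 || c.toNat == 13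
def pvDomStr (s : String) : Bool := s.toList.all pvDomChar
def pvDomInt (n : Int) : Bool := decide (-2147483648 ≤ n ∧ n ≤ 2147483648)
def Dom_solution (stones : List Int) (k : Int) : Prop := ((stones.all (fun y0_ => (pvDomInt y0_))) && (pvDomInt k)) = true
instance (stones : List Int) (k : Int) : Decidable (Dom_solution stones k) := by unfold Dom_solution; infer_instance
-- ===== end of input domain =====

-- B replaces A's binary search over the answer value (one O(n) run-length scan per probe) by a
-- single O(n) two-pass block sliding-window-maximum computation followed by a min over all windows.

-- ===== PORT A =====
-- the loop body of check(mid, stones, k): state (cnt, res)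
def chkStep (mid : Int) : (Int × Int) → Int → (Int × Int) := fun p v =>
  if v < mid then (p.1 + 1, p.2) else (0, if p.2 ≤ p.1 then p.1 else p.2)

-- check(mid, stones, k): longest run of values < mid, compared with k
def solCheck (mid : Int) (stones : List Int) (k : Int) : Bool :=
  let st := stones.foldl (chkStep mid) ((0 : Int), (-25557000000 : Int))
  decide (k ≤ (if st.2 ≤ st.1 then st.1 else st.2))

-- the while-loop of A's binary search (state s, e, res)
def solGo (stones : List Int) (k : Int) (s e res : Int) : Int :=
  if _h : s ≤ e then
    if solCheck (PySem.Int.floordiv (s + e) 2) stones k then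
      solGo stones k s (PySem.Int.floordiv (s + e) 2 - 1) res
    else
      solGo stones k (PySem.Int.floordiv (s + e) 2 + 1) e (PySem.Int.floordiv (s + e) 2)
  else res
termination_by (e + 1 - s).toNat
decreasing_by
  · have h2 := PySem.Int.floordiv_two_mid_bounds _h
    omega
  · have h2 := PySem.Int.floordiv_two_mid_bounds _h
    omega

def solution (stones : List Int) (k : Int) : Int :=
  match PySem.List.max? stones (fun x => x) with
  | none => 0        -- max([]) raises ValueError: excluded by Pre_solution
  | some e => solGo stones k 1 e 0

-- ===== PORT B =====
-- loop body of B's forward pass ('if j % k and pre[j-1] > pre[j]: pre[j] = pre[j-1]')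
def preStep (k : Int) : List Int → Int → List Int := fun acc j =>
  if PySem.Int.mod j k ≠ 0 ∧ PySem.List.pyGetD acc j 0 < PySem.List.pyGetD acc (j - 1) 0
  then PySem.List.pySetD acc j (PySem.List.pyGetD acc (j - 1) 0) else acc

-- loop body of B's backward pass ('if (j+1) % k and suf[j+1] > suf[j]: suf[j] = suf[j+1]')
def sufStep (k : Int) : List Int → Int → List Int := fun acc j =>
  if PySem.Int.mod (j + 1) k ≠ 0 ∧ PySem.List.pyGetD acc j 0 < PySem.List.pyGetD acc (j + 1) 0
  then PySem.List.pySetD acc j (PySem.List.pyGetD acc (j + 1) 0) else acc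

def solution_alt (stones : List Int) (k : Int) : Int :=
  let n : Int := (stones.length : Int)
  if k ≤ 0 then 0
  else if n < k then max 0 ((PySem.List.max? stones (fun x => x)).getD 0)
  else
    let pre := (PySem.List.pyRange 1 n 1).foldl (preStep k) stones
    let suf := (PySem.List.pyRange (n - 2) (-1) (-1)).foldl (sufStep k) stones
    let w := (PySem.List.min?
      ((suf.zip (PySem.List.slice pre (some (k - 1)) none)).map
        (fun p => if p.2 < p.1 then p.1 else p.2)) (fun x => x)).getD 0
    max 0 w

-- ===== PRECONDITION & SPEC =====
-- Pre_ excludes only the empty list, on which A's 'max(stones)' raises ValueError.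
def Pre_solution (stones : List Int) (k : Int) : Prop := stones ≠ []
instance (stones : List Int) (k : Int) : Decidable (Pre_solution stones k) := by
  unfold Pre_solution; infer_instance

def pvWitness_solution : List Int × Int := ([5, 3, 4, 6, 2], 2)

def Spec_solution (stones : List Int) (k : Int) (out : Int) : Prop := out = solution_alt stones k
instance (stones : List Int) (k : Int) (out : Int) : Decidable (Spec_solution stones k out) := by
  unfold Spec_solution; infer_instance

-- ===== CLAIM (what is proved, stated in full; the proofs are below) =====
def Claim_equal_solution : Prop := ∀ (stones : List Int) (k : Int), Dom_solution stones k → Pre_solution stones k → Spec_solution stones k (solution stones k)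

-- ===== LEMMAS AND PROOFS =====

-- the segment stones[a:b) and its maximum (junk 0 when the segment is empty)
def seg (stones : List Int) (a b : ℕ) : List Int := (stones.drop a).take (b - a)
def segMax (stones : List Int) (a b : ℕ) : Int := ((seg stones a b).max?).getD 0

-- length of the maximal all-(< mid) suffix
def trailLt (mid : Int) (xs : List Int) : ℕ := (xs.rtakeWhile (fun v => decide (v < mid))).length

-- ---- generic max-of-nonempty-list facts ----
lemma lmaxD_mem {l : List Int} (h : l ≠ []) : (l.max?).getD 0 ∈ l := by
  cases h' : l.max? with
  | none => exact absurd (List.max?_eq_none_iff.mp h') h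
  | some m => simpa using List.max?_mem h'


lemma le_lmaxD {l : List Int} {x : Int} (hx : x ∈ l) : x ≤ (l.max?).getD 0 := by
  cases h' : l.max? with
  | none => exact absurd (List.max?_eq_none_iff.mp h') (by rintro rfl; cases hx)
  | some m => simpa using (List.max?_eq_some_iff.mp h').2 x hx


lemma lmaxD_lt_iff {l : List Int} (h : l ≠ []) {c : Int} :
    (l.max?).getD 0 < c ↔ ∀ v ∈ l, v < c := by
  constructor
  · intro hlt v hv; exact lt_of_le_of_lt (le_lmaxD hv) hlt
  · intro hall; exact hall _ (lmaxD_mem h)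


-- ---- seg facts ----
lemma seg_ne_nil {stones : List Int} {a b : ℕ} (hab : a < b) (hb : b ≤ stones.length) :
    seg stones a b ≠ [] := by
  have : (seg stones a b).length = min (b - a) (stones.length - a) := by
    simp [seg]
  intro hnil
  rw [hnil] at this
  simp at this
  omega


lemma seg_append {stones : List Int} {a c b : ℕ} (h1 : a ≤ c) (h2 : c ≤ b) :
    seg stones a b = seg stones a c ++ seg stones c b := by
  unfold seg
  have hba : b - a = (c - a) + (b - c) := by omega
  rw [hba, List.take_add, List.drop_drop]
  have : a + (c - a) = c := by omega
  rw [this]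


lemma segMax_split {stones : List Int} {a c b : ℕ} (h1 : a < c) (h2 : c < b)
    (hb : b ≤ stones.length) :
    segMax stones a b = max (segMax stones a c) (segMax stones c b) := by
  have hcb : seg stones a b = seg stones a c ++ seg stones c b :=
    seg_append (le_of_lt h1) (le_of_lt h2)
  apply le_antisymm
  · have hmem : segMax stones a b ∈ seg stones a b :=
      lmaxD_mem (seg_ne_nil (lt_trans h1 h2) hb)
    rw [hcb] at hmem
    rcases List.mem_append.mp hmem with hm | hm
    · exact le_max_of_le_left (le_lmaxD hm)
    · exact le_max_of_le_right (le_lmaxD hm)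
  · apply max_le
    · have hmem : segMax stones a c ∈ seg stones a c :=
        lmaxD_mem (seg_ne_nil h1 (le_trans (le_of_lt h2) hb))
      have : segMax stones a c ∈ seg stones a b := by
        rw [hcb]; exact List.mem_append.mpr (Or.inl hmem)
      exact le_lmaxD this
    · have hmem : segMax stones c b ∈ seg stones c b :=
        lmaxD_mem (seg_ne_nil h2 hb)
      have : segMax stones c b ∈ seg stones a b := by
        rw [hcb]; exact List.mem_append.mpr (Or.inr hmem)
      exact le_lmaxD this


lemma segMax_single {stones : List Int} {a : ℕ} (ha : a < stones.length) :
    segMax stones a (a + 1) = stones.getD a 0 := by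
  have hdrop : stones.drop a = stones[a] :: stones.drop (a + 1) :=
    List.drop_eq_getElem_cons ha
  unfold segMax seg
  rw [show a + 1 - a = 1 by omega, hdrop, List.take_succ_cons, List.take_zero]
  simp [List.max?, List.getElem?_eq_getElem ha]


lemma segMax_lt_iff {stones : List Int} {a b : ℕ} (hab : a < b) (hb : b ≤ stones.length)
    {c : Int} : segMax stones a b < c ↔ ∀ v ∈ seg stones a b, v < c := by
  exact lmaxD_lt_iff (seg_ne_nil hab hb)


lemma segMax_mem_stones {stones : List Int} {a b : ℕ} (hab : a < b) (hb : b ≤ stones.length) :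
    segMax stones a b ∈ stones := by
  have := lmaxD_mem (seg_ne_nil hab hb)
  unfold seg at this
  exact List.mem_of_mem_drop (List.mem_of_mem_take this)


-- ---- trail facts ----
lemma takeWhile_len_ge (mid : Int) (r : List Int) (j : ℕ) :
    j ≤ (r.takeWhile (fun v => decide (v < mid))).length ↔
      j ≤ r.length ∧ ∀ v ∈ r.take j, v < mid := by
  induction r generalizing j with
  | nil => simp
  | cons a r ih =>
    by_cases ha : a < mid
    · rw [List.takeWhile_cons_of_pos (by simpa using ha)]
      cases j with
      | zero => simp
      | succ j =>
        simp only [List.length_cons, List.take_succ_cons, List.mem_cons,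
          Nat.add_le_add_iff_right]
        rw [ih j]
        constructor
        · rintro ⟨h1, h2⟩
          exact ⟨by omega, by rintro v (rfl | hv); exact ha; exact h2 v hv⟩
        · rintro ⟨h1, h2⟩
          exact ⟨by omega, fun v hv => h2 v (Or.inr hv)⟩
    · rw [List.takeWhile_cons_of_neg (by simpa using ha)]
      cases j with
      | zero => simp
      | succ j =>
        simp only [List.length_nil, List.take_succ_cons, List.mem_cons]
        constructor
        · omega
        · rintro ⟨h1, h2⟩
          exact absurd (h2 a (Or.inl rfl)) ha

lemma trailLt_le_length (mid : Int) (xs : List Int) : trailLt mid xs ≤ xs.length := by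
  exact (List.rtakeWhile_suffix _ _).length_le


lemma trail_ge_iff (mid : Int) (p : List Int) (j : ℕ) :
    j ≤ trailLt mid p ↔ j ≤ p.length ∧ ∀ v ∈ p.drop (p.length - j), v < mid := by
  have hdef : p.rtakeWhile (fun v => decide (v < mid)) =
      ((p.reverse.takeWhile (fun v => decide (v < mid))).reverse) := rfl
  unfold trailLt
  rw [hdef, List.length_reverse]
  rw [show (p.reverse.takeWhile (fun v => decide (v < mid))) =
      ((p.reverse).takeWhile (fun v => decide (v < mid))) from rfl]
  rw [takeWhile_len_ge mid p.reverse j, List.length_reverse]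
  constructor
  · rintro ⟨h1, h2⟩
    refine ⟨h1, fun v hv => h2 v ?_⟩
    rw [List.take_reverse]
    exact List.mem_reverse.mpr hv
  · rintro ⟨h1, h2⟩
    refine ⟨h1, fun v hv => h2 v ?_⟩
    rw [List.take_reverse] at hv
    exact List.mem_reverse.mp hv


-- ---- A's check: fold invariant and characterisation ----
lemma chk_fold_inv (mid : Int) (xs : List Int) :
    (xs.foldl (chkStep mid) ((0 : Int), (-25557000000 : Int))).1 = (trailLt mid xs : Int) ∧
    ∀ j : Int,
      (j ≤ max (xs.foldl (chkStep mid) ((0 : Int), (-25557000000 : Int))).2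
             (xs.foldl (chkStep mid) ((0 : Int), (-25557000000 : Int))).1
        ↔ ∃ i, i ≤ xs.length ∧ j ≤ (trailLt mid (xs.take i) : Int)) := by
  induction xs using List.reverseRecOn with
  | nil =>
    refine ⟨by simp [trailLt], fun j => ?_⟩
    have hm : max (-25557000000 : Int) (0 : Int) = 0 := by decide
    simp only [List.foldl_nil, hm, List.length_nil, List.take_nil]
    constructor
    · intro hj; exact ⟨0, le_refl 0, by simpa [trailLt] using hj⟩
    · rintro ⟨i, _, hj⟩; simpa [trailLt] using hj
  | append_singleton xs x ih =>
    obtain ⟨ih1, ih2⟩ := ih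
    set F := List.foldl (chkStep mid) ((0 : Int), (-25557000000 : Int)) xs with hF
    have h0 : (0 : Int) ≤ max F.2 F.1 := (ih2 0).mpr ⟨0, by omega, by simp⟩
    by_cases hx : x < mid
    · have htr : trailLt mid (xs ++ [x]) = trailLt mid xs + 1 := by
        unfold trailLt
        rw [List.rtakeWhile_concat_pos _ _ _ (by simpa using hx)]
        simp
      have hstep : List.foldl (chkStep mid) ((0 : Int), (-25557000000 : Int)) (xs ++ [x]) =
          (F.1 + 1, F.2) := by
        rw [List.foldl_concat, ← hF]
        simp [chkStep, hx]
      rw [hstep]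
      refine ⟨by rw [htr]; push_cast; omega, fun j => ?_⟩
      constructor
      · intro hj
        rcases le_max_iff.mp hj with hj2 | hj1
        · obtain ⟨i, hi, hji⟩ := (ih2 j).mp (le_max_iff.mpr (Or.inl hj2))
          refine ⟨i, by simp; omega, ?_⟩
          rwa [List.take_append_of_le_length hi]
        · refine ⟨xs.length + 1, by simp, ?_⟩
          rw [List.take_of_length_le (by simp), htr]
          have : F.1 = (trailLt mid xs : Int) := ih1
          push_cast
          omega
      · rintro ⟨i, hi, hji⟩
        by_cases hile : i ≤ xs.length
        · rw [List.take_append_of_le_length hile] at hji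
          have := (ih2 j).mpr ⟨i, hile, hji⟩
          rcases le_max_iff.mp this with h' | h'
          · exact le_max_iff.mpr (Or.inl h')
          · exact le_max_iff.mpr (Or.inr (by omega))
        · have hieq : i = xs.length + 1 := by
            simp at hi
            omega
          subst hieq
          rw [List.take_of_length_le (by simp), htr] at hji
          have : F.1 = (trailLt mid xs : Int) := ih1
          refine le_max_iff.mpr (Or.inr ?_)
          push_cast at hji
          omega
    · have htr : trailLt mid (xs ++ [x]) = 0 := by
        unfold trailLt
        rw [List.rtakeWhile_concat_neg _ _ _ (by simpa using hx)]
        simp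
      have hmax : (if F.2 ≤ F.1 then F.1 else F.2) = max F.2 F.1 := (max_def F.2 F.1).symm
      have hstep : List.foldl (chkStep mid) ((0 : Int), (-25557000000 : Int)) (xs ++ [x]) =
          (0, max F.2 F.1) := by
        rw [List.foldl_concat, ← hF]
        simp only [chkStep, hx, if_false, hmax]
      rw [hstep]
      refine ⟨by simp [htr], fun j => ?_⟩
      constructor
      · intro hj
        have hj' : j ≤ max F.2 F.1 := by
          rcases le_max_iff.mp hj with h' | h'
          · exact h'
          · omega
        obtain ⟨i, hi, hji⟩ := (ih2 j).mp hj'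
        refine ⟨i, by simp; omega, ?_⟩
        rwa [List.take_append_of_le_length hi]
      · rintro ⟨i, hi, hji⟩
        by_cases hile : i ≤ xs.length
        · rw [List.take_append_of_le_length hile] at hji
          exact le_max_iff.mpr (Or.inl ((ih2 j).mpr ⟨i, hile, hji⟩))
        · have hieq : i = xs.length + 1 := by
            simp at hi
            omega
          subst hieq
          rw [List.take_of_length_le (by simp), htr] at hji
          exact le_max_iff.mpr (Or.inl (by omega))


lemma check_iff (mid : Int) (stones : List Int) (k : Int) :
    solCheck mid stones k = true ↔
      ∃ i, i ≤ stones.length ∧ k ≤ (trailLt mid (stones.take i) : Int) := by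
  unfold solCheck
  simp only [decide_eq_true_iff, ← max_def]
  exact (chk_fold_inv mid stones).2 k


-- check ⟺ some window of length k is entirely below mid  (1 ≤ k ≤ n)
lemma check_iff_window (mid : Int) (stones : List Int) (k : Int) (kN : ℕ) (hk : k = (kN : Int))
    (h1 : 1 ≤ kN) (h2 : kN ≤ stones.length) :
    solCheck mid stones k = true ↔
      ∃ i, i + kN ≤ stones.length ∧ segMax stones i (i + kN) < mid := by
  subst hk
  rw [check_iff]
  constructor
  · rintro ⟨i, hi, hji⟩
    have hji' : kN ≤ trailLt mid (stones.take i) := by exact_mod_cast hji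
    obtain ⟨hlen, hall⟩ := (trail_ge_iff mid (stones.take i) kN).mp hji'
    have hlen' : (stones.take i).length = i := by simp; omega
    refine ⟨i - kN, by omega, ?_⟩
    rw [segMax_lt_iff (by omega) (by omega)]
    intro v hv
    apply hall
    rw [hlen', List.drop_take]
    have : i - (i - kN) = kN := by
      rw [hlen'] at hlen
      omega
    rw [this]
    have hseg : seg stones (i - kN) (i - kN + kN) = (stones.drop (i - kN)).take kN := by
      unfold seg
      congr 1
      omega
    rw [hseg] at hv
    exact hv
  · rintro ⟨i, hik, hseg⟩
    refine ⟨i + kN, hik, ?_⟩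
    have : kN ≤ trailLt mid (stones.take (i + kN)) := by
      rw [trail_ge_iff]
      have hlen' : (stones.take (i + kN)).length = i + kN := by simp; omega
      refine ⟨by omega, ?_⟩
      intro v hv
      rw [hlen', List.drop_take, show i + kN - (i + kN - kN) = kN by omega] at hv
      rw [segMax_lt_iff (by omega) (by omega)] at hseg
      apply hseg
      unfold seg
      rw [show i + kN - i = kN by omega]
      rw [show i + kN - kN = i by omega] at hv
      exact hv
    exact_mod_cast this


-- check is identically false when k > n
lemma check_false_of_big (mid : Int) (stones : List Int) (k : Int)
    (h : (stones.length : Int) < k) : solCheck mid stones k = false := by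
  by_contra hne
  have h' : solCheck mid stones k = true := by
    cases hb : solCheck mid stones k
    · exact absurd hb hne
    · rfl
  exfalso
  obtain ⟨i, hi, hji⟩ := (check_iff mid stones k).mp h'
  have h1 := trailLt_le_length mid (stones.take i)
  have h2 : (stones.take i).length ≤ stones.length := by simp
  omega


-- check is identically true when k ≤ 0
lemma check_true_of_nonpos (mid : Int) (stones : List Int) (k : Int) (h : k ≤ 0) :
    solCheck mid stones k = true := by
  rw [check_iff]
  exact ⟨0, by omega, by simp [trailLt]; omega⟩


-- ---- A's binary search loop ----
lemma solGo_formula (stones : List Int) (k W : Int) :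
    ∀ (N : ℕ) (s e res : Int), (e + 1 - s).toNat ≤ N →
      (∀ mid, s ≤ mid → mid ≤ e → (solCheck mid stones k = true ↔ W < mid)) →
      solGo stones k s e res = if s ≤ e ∧ s ≤ W then min e W else res := by
  intro N
  induction N with
  | zero =>
    intro s e res hle _
    rw [solGo]
    have hse : ¬ s ≤ e := by omega
    simp [hse]
  | succ N ihN =>
    intro s e res hle hchk
    rw [solGo]
    by_cases hse : s ≤ e
    · have hmid := PySem.Int.floordiv_two_mid_bounds hse
      rw [dif_pos hse]
      by_cases hc : solCheck (PySem.Int.floordiv (s + e) 2) stones k = true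
      · rw [if_pos hc,
          ihN s (PySem.Int.floordiv (s + e) 2 - 1) res (by omega)
            (fun m u1 u2 => hchk m u1 (by omega))]
        have hW : W < PySem.Int.floordiv (s + e) 2 := (hchk _ hmid.1 hmid.2).mp hc
        simp only [min_def]
        split_ifs <;> omega
      · rw [if_neg hc,
          ihN (PySem.Int.floordiv (s + e) 2 + 1) e (PySem.Int.floordiv (s + e) 2) (by omega)
            (fun m u1 u2 => hchk m (by omega) u2)]
        have hW : ¬ W < PySem.Int.floordiv (s + e) 2 := fun h =>
          hc ((hchk _ hmid.1 hmid.2).mpr h)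
        simp only [min_def]
        split_ifs <;> omega
    · simp [hse]


-- ---- B's two passes ----
lemma getD_set_eq (l : List Int) (j : ℕ) (v : Int) (hj : j < l.length) :
    (l.set j v).getD j 0 = v := by
  rw [List.getD_eq_getElem _ _ (by simpa using hj)]
  simp


lemma getD_set_ne (l : List Int) (i j : ℕ) (v : Int) (hij : i ≠ j) :
    (l.set j v).getD i 0 = l.getD i 0 := by
  by_cases hi : i < l.length
  · rw [List.getD_eq_getElem _ _ (by simpa using hi), List.getD_eq_getElem _ _ hi]
    simp [(Ne.symm hij)]
  · rw [List.getD_eq_default _ _ (by simpa using (not_lt.mp hi)),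
        List.getD_eq_default _ _ (not_lt.mp hi)]


-- forward pass: pre[l] = max of stones over [l - l % k, l] for processed l
lemma pre_inv (stones : List Int) (k : Int) (kN : ℕ) (hk : k = (kN : Int)) (hkp : 0 < kN) :
    ∀ m : ℕ, 1 ≤ m → m ≤ stones.length →
      ((PySem.List.pyRange 1 (m : Int) 1).foldl (preStep k) stones).length = stones.length ∧
      ∀ l : ℕ, l < stones.length →
        ((PySem.List.pyRange 1 (m : Int) 1).foldl (preStep k) stones).getD l 0 =
          if l < m then segMax stones (l - l % kN) (l + 1) else stones.getD l 0 := by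
  intro m
  induction m with
  | zero => omega
  | succ m ih =>
    intro _ hmn
    by_cases hm0 : m = 0
    · subst hm0
      rw [show ((1 : ℕ) : Int) = 1 by norm_num, PySem.List.pyRange_one_eq_nil (by omega)]
      refine ⟨rfl, fun l hl => ?_⟩
      by_cases hl1 : l < 1
      · have hl0 : l = 0 := by omega
        subst hl0
        rw [if_pos (by omega), Nat.zero_mod, segMax_single hl]
        simp
      · rw [if_neg hl1]
        simp
    · obtain ⟨ihlen, ihval⟩ := ih (by omega) (by omega)
      set P := (PySem.List.pyRange 1 (m : Int) 1).foldl (preStep k) stones with hP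
      have ihlen' : P.length = stones.length := ihlen
      have ihval' : ∀ l : ℕ, l < stones.length → P.getD l 0 =
          if l < m then segMax stones (l - l % kN) (l + 1) else stones.getD l 0 := ihval
      have hcast : (((m + 1 : ℕ)) : Int) = (m : Int) + 1 := by push_cast; ring
      have hrange : PySem.List.pyRange 1 (((m + 1 : ℕ)) : Int) 1 =
          PySem.List.pyRange 1 (m : Int) 1 ++ [(m : Int)] := by
        rw [hcast]
        exact PySem.List.pyRange_one_succ_right (by exact_mod_cast Nat.one_le_iff_ne_zero.mpr hm0)
      have hmlt : m < stones.length := by omega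
      have hgm : PySem.List.pyGetD P ((m : Int)) 0 = stones.getD m 0 := by
        rw [PySem.List.pyGetD_natCast, ihval' m hmlt, if_neg (by omega)]
      have hgm1 : PySem.List.pyGetD P ((m : Int) - 1) 0 =
          segMax stones (m - 1 - (m - 1) % kN) m := by
        rw [show ((m : Int) - 1) = (((m - 1 : ℕ)) : Int) by omega,
          PySem.List.pyGetD_natCast, ihval' (m - 1) (by omega), if_pos (by omega),
          show m - 1 + 1 = m by omega]
      have hmod : PySem.Int.mod ((m : Int)) k = (((m % kN : ℕ)) : Int) := by
        rw [hk]
        exact PySem.Int.mod_natCast m kN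
      rw [hrange, List.foldl_concat]
      simp only [preStep]
      rw [hgm, hgm1, hmod]
      by_cases hr : m % kN = 0
      · rw [if_neg (by simp [hr])]
        refine ⟨ihlen, fun l hl => ?_⟩
        rw [ihval l hl]
        by_cases hlm : l < m
        · rw [if_pos hlm, if_pos (by omega)]
        · by_cases hlm1 : l < m + 1
          · have hleq : l = m := by omega
            subst hleq
            rw [if_neg hlm, if_pos hlm1, hr, Nat.sub_zero, segMax_single hmlt]
          · rw [if_neg hlm, if_neg hlm1]
      · have hsplit : segMax stones (m - m % kN) (m + 1) =
            max (segMax stones (m - m % kN) m) (segMax stones m (m + 1)) := by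
          apply segMax_split (by omega) (by omega) (by omega)
        have hbs : m - 1 - (m - 1) % kN = m - m % kN := by
          have hrlt : m % kN < kN := Nat.mod_lt _ hkp
          have e1 : m - 1 = kN * (m / kN) + (m % kN - 1) := by
            have := Nat.div_add_mod m kN
            omega
          have e2 : (m - 1) % kN = m % kN - 1 := by
            rw [e1, Nat.mul_add_mod, Nat.mod_eq_of_lt (by omega)]
          omega
        have hsingle : segMax stones m (m + 1) = stones.getD m 0 := segMax_single hmlt
        by_cases hcmp : stones.getD m 0 < segMax stones (m - 1 - (m - 1) % kN) m
        · rw [if_pos ⟨by exact_mod_cast hr, hcmp⟩, PySem.List.pySetD_natCast]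
          refine ⟨by rw [List.length_set, ihlen'], fun l hl => ?_⟩
          by_cases hlm : l = m
          · subst hlm
            rw [getD_set_eq _ _ _ (by rw [ihlen']; exact hmlt), if_pos (by omega), hsplit,
              hsingle, hbs]
            rw [hbs] at hcmp
            exact (max_eq_left (le_of_lt hcmp)).symm
          · rw [getD_set_ne _ _ _ _ hlm, ihval' l hl]
            by_cases hlm1 : l < m
            · rw [if_pos hlm1, if_pos (by omega)]
            · rw [if_neg hlm1, if_neg (by omega)]
        · rw [if_neg (by rintro ⟨-, h2⟩; exact hcmp h2)]
          refine ⟨ihlen, fun l hl => ?_⟩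
          rw [ihval l hl]
          by_cases hlm : l = m
          · subst hlm
            rw [if_neg (by omega), if_pos (by omega), hsplit, hsingle]
            rw [hbs] at hcmp
            omega
          · by_cases hlm1 : l < m
            · rw [if_pos hlm1, if_pos (by omega)]
            · rw [if_neg hlm1, if_neg (by omega)]


-- block end for the backward pass
def bend (stones : List Int) (kN l : ℕ) : ℕ := min ((l / kN + 1) * kN) stones.length

-- backward pass: suf[l] = max of stones over [l, bend l) for processed l
lemma suf_inv (stones : List Int) (k : Int) (kN : ℕ) (hk : k = (kN : Int)) (hkp : 0 < kN)
    (hn : 1 ≤ stones.length) :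
    ∀ m : ℕ, m ≤ stones.length - 1 →
      (((PySem.List.pyRange (m : Int) ((stones.length : Int) - 1) 1).reverse).foldl
          (sufStep k) stones).length = stones.length ∧
      ∀ l : ℕ, l < stones.length →
        (((PySem.List.pyRange (m : Int) ((stones.length : Int) - 1) 1).reverse).foldl
            (sufStep k) stones).getD l 0 =
          if m ≤ l then segMax stones l (bend stones kN l) else stones.getD l 0 := by
  have aux : ∀ d m : ℕ, m + d = stones.length - 1 →
      (((PySem.List.pyRange (m : Int) ((stones.length : Int) - 1) 1).reverse).foldl
          (sufStep k) stones).length = stones.length ∧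
      ∀ l : ℕ, l < stones.length →
        (((PySem.List.pyRange (m : Int) ((stones.length : Int) - 1) 1).reverse).foldl
            (sufStep k) stones).getD l 0 =
          if m ≤ l then segMax stones l (bend stones kN l) else stones.getD l 0 := by
    intro d
    induction d with
    | zero =>
      intro m hm
      rw [PySem.List.pyRange_one_eq_nil (by omega), List.reverse_nil]
      refine ⟨rfl, fun l hl => ?_⟩
      by_cases hml : m ≤ l
      · have hleq : l = stones.length - 1 := by omega
        have hbl : bend stones kN l = l + 1 := by
          unfold bend
          have hd := Nat.div_add_mod l kN
          have hrlt : l % kN < kN := Nat.mod_lt _ hkp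
          have hdist : (l / kN + 1) * kN = kN * (l / kN) + kN := by ring
          omega
        rw [if_pos hml, hbl, segMax_single hl]
        simp
      · rw [if_neg hml]
        simp
    | succ d ihd =>
      intro m hm
      obtain ⟨ihlen, ihval⟩ := ihd (m + 1) (by omega)
      have hmn : m + 1 < stones.length := by omega
      have hcast : ((m : Int) + 1) = (((m + 1 : ℕ)) : Int) := by push_cast; ring
      have hrange : PySem.List.pyRange (m : Int) ((stones.length : Int) - 1) 1 =
          (m : Int) :: PySem.List.pyRange (((m + 1 : ℕ)) : Int) ((stones.length : Int) - 1) 1 := by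
        rw [← hcast]
        exact PySem.List.pyRange_one_cons (by omega)
      rw [hrange, List.reverse_cons, List.foldl_concat]
      set S := ((PySem.List.pyRange (((m + 1 : ℕ)) : Int) ((stones.length : Int) - 1) 1).reverse).foldl
          (sufStep k) stones with hS
      have ihlen' : S.length = stones.length := ihlen
      have ihval' : ∀ l : ℕ, l < stones.length → S.getD l 0 =
          if m + 1 ≤ l then segMax stones l (bend stones kN l) else stones.getD l 0 := ihval
      have hgm : PySem.List.pyGetD S ((m : Int)) 0 = stones.getD m 0 := by
        rw [PySem.List.pyGetD_natCast, ihval' m (by omega), if_neg (by omega)]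
      have hgm1 : PySem.List.pyGetD S ((m : Int) + 1) 0 =
          segMax stones (m + 1) (bend stones kN (m + 1)) := by
        rw [hcast, PySem.List.pyGetD_natCast, ihval' (m + 1) hmn, if_pos (by omega)]
      have hmod : PySem.Int.mod ((m : Int) + 1) k = ((((m + 1) % kN : ℕ)) : Int) := by
        rw [hcast, hk]
        exact PySem.Int.mod_natCast (m + 1) kN
      simp only [sufStep]
      rw [hgm, hgm1, hmod]
      by_cases hr : (m + 1) % kN = 0
      · rw [if_neg (by simp [hr])]
        refine ⟨ihlen', fun l hl => ?_⟩
        rw [ihval' l hl]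
        by_cases hlm : m + 1 ≤ l
        · rw [if_pos hlm, if_pos (by omega)]
        · by_cases hlm1 : m ≤ l
          · have hleq : l = m := by omega
            subst hleq
            have hdvd : kN ∣ l + 1 := Nat.dvd_of_mod_eq_zero hr
            have hkle : kN ≤ l + 1 := Nat.le_of_dvd (by omega) hdvd
            obtain ⟨Qp, hQ⟩ : ∃ Qp, (l + 1) / kN = Qp + 1 :=
              ⟨(l + 1) / kN - 1, by have := Nat.div_pos hkle hkp; omega⟩
            have hd1 := Nat.div_add_mod (l + 1) kN
            have hA : kN * (Qp + 1) = l + 1 := by rw [← hQ]; omega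
            have hdist : kN * (Qp + 1) = kN * Qp + kN := by ring
            have hc1 : Qp * kN = kN * Qp := by ring
            have hc2 : (Qp + 1) * kN = kN * Qp + kN := by ring
            have hmdiv : l / kN = Qp := Nat.div_eq_of_lt_le (by omega) (by omega)
            have hbl : bend stones kN l = l + 1 := by
              unfold bend
              rw [hmdiv]
              omega
            rw [if_neg hlm, if_pos hlm1, hbl, segMax_single hl]
          · rw [if_neg hlm, if_neg hlm1]
      · have hd := Nat.div_add_mod m kN
        have hrlt : m % kN < kN := Nat.mod_lt _ hkp
        have hnd : ¬ (m % kN = kN - 1) := by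
          intro h
          apply hr
          have hdist : kN * (m / kN + 1) = kN * (m / kN) + kN := by ring
          have : m + 1 = kN * (m / kN + 1) := by omega
          rw [this, Nat.mul_mod_right]
        have hdiv : (m + 1) / kN = m / kN := by
          have hnot : ¬ kN ∣ (m + 1) := fun hdvd => hr (Nat.mod_eq_zero_of_dvd hdvd)
          rw [Nat.succ_div, if_neg hnot, Nat.add_zero]
        have hbend : bend stones kN (m + 1) = bend stones kN m := by
          unfold bend
          rw [hdiv]
        have hdist : (m / kN + 1) * kN = kN * (m / kN) + kN := by ring
        have hlt : m + 1 < bend stones kN m := by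
          unfold bend
          omega
        have hble : bend stones kN m ≤ stones.length := by
          unfold bend
          omega
        have hsplit : segMax stones m (bend stones kN m) =
            max (segMax stones m (m + 1)) (segMax stones (m + 1) (bend stones kN m)) :=
          segMax_split (by omega) hlt hble
        have hsingle : segMax stones m (m + 1) = stones.getD m 0 := segMax_single (by omega)
        by_cases hcmp : stones.getD m 0 < segMax stones (m + 1) (bend stones kN (m + 1))
        · rw [if_pos ⟨by exact_mod_cast hr, hcmp⟩, PySem.List.pySetD_natCast]
          refine ⟨by rw [List.length_set, ihlen'], fun l hl => ?_⟩
          by_cases hlm : l = m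
          · subst hlm
            rw [getD_set_eq _ _ _ (by rw [ihlen']; exact hl), if_pos (by omega), hbend,
              hsplit, hsingle]
            rw [hbend] at hcmp
            exact (max_eq_right (le_of_lt hcmp)).symm
          · rw [getD_set_ne _ _ _ _ hlm, ihval' l hl]
            by_cases hlm1 : m + 1 ≤ l
            · rw [if_pos hlm1, if_pos (by omega)]
            · rw [if_neg hlm1, if_neg (by omega)]
        · rw [if_neg (by rintro ⟨-, h2⟩; exact hcmp h2)]
          refine ⟨ihlen', fun l hl => ?_⟩
          rw [ihval' l hl]
          by_cases hlm : l = m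
          · subst hlm
            rw [if_neg (by omega), if_pos (by omega), hsplit, hsingle]
            rw [hbend] at hcmp
            omega
          · by_cases hlm1 : m + 1 ≤ l
            · rw [if_pos hlm1, if_pos (by omega)]
            · rw [if_neg hlm1, if_neg (by omega)]
  intro m hm
  exact aux (stones.length - 1 - m) m (by omega)


-- the window split: max(suf[i], pre[i+k-1]) is the max of window [i, i+k)
lemma window_split (stones : List Int) (kN : ℕ) (hkp : 0 < kN) (i : ℕ)
    (hi : i + kN ≤ stones.length) :
    max (segMax stones i (bend stones kN i))
        (segMax stones (i + kN - 1 - (i + kN - 1) % kN) (i + kN)) =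
      segMax stones i (i + kN) := by
  have hrlt : i % kN < kN := Nat.mod_lt _ hkp
  have hd : kN * (i / kN) + i % kN = i := Nat.div_add_mod i kN
  have e3 : (i / kN + 1) * kN = i - i % kN + kN := by
    have : (i / kN + 1) * kN = kN * (i / kN) + kN := by ring
    omega
  by_cases hr : i % kN = 0
  · have e1 : i + kN - 1 = kN * (i / kN) + (kN - 1) := by omega
    have e2 : (i + kN - 1) % kN = kN - 1 := by
      rw [e1, Nat.mul_add_mod, Nat.mod_eq_of_lt (by omega)]
    have hbend : bend stones kN i = i + kN := by
      unfold bend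
      rw [e3]
      omega
    rw [hbend, e2, show i + kN - 1 - (kN - 1) = i by omega, max_self]
  · have e1 : i + kN - 1 = kN * (i / kN + 1) + (i % kN - 1) := by
      have : kN * (i / kN + 1) = kN * (i / kN) + kN := by ring
      omega
    have e2 : (i + kN - 1) % kN = i % kN - 1 := by
      rw [e1, Nat.mul_add_mod, Nat.mod_eq_of_lt (by omega)]
    have hbend : bend stones kN i = i - i % kN + kN := by
      unfold bend
      rw [e3]
      omega
    rw [hbend, e2, show i + kN - 1 - (i % kN - 1) = i - i % kN + kN by omega]
    exact (segMax_split (by omega) (by omega) (by omega)).symm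


-- ---- assembly ----
theorem solution_spec : Claim_equal_solution := by
  intro stones k _dom hpre
  unfold Spec_solution
  obtain ⟨e, he⟩ : ∃ e, PySem.List.max? stones (fun x => x) = some e := by
    cases h : PySem.List.max? stones (fun x => x) with
    | none => exact absurd ((PySem.List.max?_eq_none_iff _ _).mp h) hpre
    | some e => exact ⟨e, rfl⟩
  have hA : solution stones k = solGo stones k 1 e 0 := by
    unfold solution
    rw [he]
  have heub : ∀ y ∈ stones, y ≤ e := fun y hy => PySem.List.max?_isMax he y hy
  have hnpos : 0 < stones.length := List.length_pos_of_ne_nil hpre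
  by_cases hk0 : k ≤ 0
  · have hB : solution_alt stones k = 0 := by
      simp only [solution_alt]
      rw [if_pos hk0]
    rw [hA, hB,
      solGo_formula stones k 0 (e + 1 - 1).toNat 1 e 0 (by omega)
        (fun mid h1 h2 => by rw [check_true_of_nonpos mid stones k hk0]; simp; omega)]
    rw [if_neg (by omega)]
  · by_cases hkn : (stones.length : Int) < k
    · have hB : solution_alt stones k = max 0 e := by
        simp only [solution_alt]
        rw [if_neg hk0, if_pos hkn, he]
        rfl
      rw [hA, hB,
        solGo_formula stones k e (e + 1 - 1).toNat 1 e 0 (by omega)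
          (fun mid h1 h2 => by rw [check_false_of_big mid stones k hkn]; simp; omega)]
      split_ifs <;> omega
    · -- main case: 1 ≤ k ≤ len(stones)
      obtain ⟨kN, hkk⟩ : ∃ kN : ℕ, k = (kN : Int) := ⟨k.toNat, by omega⟩
      have hkN1 : 1 ≤ kN := by omega
      have hkNn : kN ≤ stones.length := by omega
      obtain ⟨hPlen, hPval⟩ :=
        pre_inv stones k kN hkk (by omega) stones.length (by omega) (le_refl _)
      obtain ⟨hSlen, hSval⟩ := suf_inv stones k kN hkk (by omega) (by omega) 0 (by omega)
      simp only [Nat.cast_zero] at hSlen hSval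
      have hrev : PySem.List.pyRange ((stones.length : Int) - 2) (-1) (-1) =
          (PySem.List.pyRange 0 ((stones.length : Int) - 1) 1).reverse := by
        rw [PySem.List.pyRange_neg_one_eq_reverse, show (-1 : Int) + 1 = 0 by norm_num,
          show (stones.length : Int) - 2 + 1 = (stones.length : Int) - 1 by ring]
      set P := (PySem.List.pyRange 1 ((stones.length : ℕ) : Int) 1).foldl (preStep k) stones
        with hP
      set S := ((PySem.List.pyRange 0 ((stones.length : Int) - 1) 1).reverse).foldl
        (sufStep k) stones with hS
      have hslice : PySem.List.slice P (some (k - 1)) none = P.drop (kN - 1) := by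
        rw [show (k - 1 : Int) = (((kN - 1 : ℕ)) : Int) by omega]
        exact PySem.List.slice_from_natCast P (kN - 1)
      have hL : (S.zip (PySem.List.slice P (some (k - 1)) none)).map
            (fun p : Int × Int => if p.2 < p.1 then p.1 else p.2) =
          (List.range (stones.length - kN + 1)).map
            (fun i => segMax stones i (i + kN)) := by
        rw [hslice]
        apply List.ext_getElem
        · simp only [List.length_map, List.length_zip, List.length_drop, List.length_range,
            hPlen, hSlen]
          omega
        · intro i h1 h2
          simp only [List.length_map, List.length_zip, List.length_drop, hPlen, hSlen] at h1
          have hiw : i + kN ≤ stones.length := by omega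
          simp only [List.getElem_map, List.getElem_zip, List.getElem_drop,
            List.getElem_range]
          have hSi : S[i]'(by rw [hSlen]; omega) = segMax stones i (bend stones kN i) := by
            have hv := hSval i (by omega)
            rw [List.getD_eq_getElem _ _ (by rw [hSlen]; omega), if_pos (Nat.zero_le i)] at hv
            exact hv
          have hPi : P[kN - 1 + i]'(by rw [hPlen]; omega) =
              segMax stones ((kN - 1 + i) - (kN - 1 + i) % kN) (kN - 1 + i + 1) := by
            have hv := hPval (kN - 1 + i) (by omega)
            rw [List.getD_eq_getElem _ _ (by rw [hPlen]; omega), if_pos (by omega)] at hv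
            exact hv
          rw [hSi, hPi]
          have hmx : (if segMax stones ((kN - 1 + i) - (kN - 1 + i) % kN) (kN - 1 + i + 1) <
                segMax stones i (bend stones kN i)
              then segMax stones i (bend stones kN i)
              else segMax stones ((kN - 1 + i) - (kN - 1 + i) % kN) (kN - 1 + i + 1)) =
              max (segMax stones i (bend stones kN i))
                (segMax stones ((kN - 1 + i) - (kN - 1 + i) % kN) (kN - 1 + i + 1)) := by
            rw [max_def]
            split_ifs <;> omega
          rw [hmx, show kN - 1 + i = i + kN - 1 by omega, show i + kN - 1 + 1 = i + kN by omega]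
          exact window_split stones kN (by omega) i hiw
      obtain ⟨w, hw⟩ : ∃ w, PySem.List.min? ((S.zip (PySem.List.slice P (some (k - 1)) none)).map
          (fun p : Int × Int => if p.2 < p.1 then p.1 else p.2)) (fun x => x) = some w := by
        cases hmw : PySem.List.min? ((S.zip (PySem.List.slice P (some (k - 1)) none)).map
            (fun p : Int × Int => if p.2 < p.1 then p.1 else p.2)) (fun x => x) with
        | none =>
          exfalso
          have hnil := (PySem.List.min?_eq_none_iff _ _).mp hmw
          rw [hL] at hnil
          simp only [List.map_eq_nil_iff, List.range_eq_nil] at hnil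
          omega
        | some w => exact ⟨w, rfl⟩
      have hwmem : ∃ i, i + kN ≤ stones.length ∧ w = segMax stones i (i + kN) := by
        have hm := PySem.List.min?_mem hw
        rw [hL] at hm
        obtain ⟨i, hi, hv⟩ := List.mem_map.mp hm
        exact ⟨i, by simp at hi; omega, hv.symm⟩
      have hwmin : ∀ i, i + kN ≤ stones.length → w ≤ segMax stones i (i + kN) := by
        intro i hi
        have : segMax stones i (i + kN) ∈ (List.range (stones.length - kN + 1)).map
            (fun i => segMax stones i (i + kN)) :=
          List.mem_map.mpr ⟨i, List.mem_range.mpr (by omega), rfl⟩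
        rw [← hL] at this
        exact PySem.List.min?_isMin hw _ this
      have hwe : w ≤ e := by
        obtain ⟨i, hi, hv⟩ := hwmem
        rw [hv]
        exact heub _ (segMax_mem_stones (by omega) hi)
      have hcheckW : ∀ mid : Int, solCheck mid stones k = true ↔ w < mid := by
        intro mid
        rw [check_iff_window mid stones k kN hkk hkN1 hkNn]
        constructor
        · rintro ⟨i, hi, hlt⟩
          exact lt_of_le_of_lt (hwmin i hi) hlt
        · intro hlt
          obtain ⟨i, hi, hv⟩ := hwmem
          exact ⟨i, hi, by rw [← hv]; exact hlt⟩
      have hB : solution_alt stones k = max 0 w := by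
        simp only [solution_alt]
        rw [if_neg hk0, if_neg hkn, hrev, ← hP, ← hS, hw]
        rfl
      rw [hA, hB,
        solGo_formula stones k w (e + 1 - 1).toNat 1 e 0 (by omega)
          (fun mid h1 h2 => hcheckW mid)]
      split_ifs <;> omega
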